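-- pv_equiv track=rewrite | github.com/damogranlabs/serial-tool | src/logHandler.py | _getTracebackPartsFromLines
-- ===== SOURCE A (Python) =====
-- INDENTATION_STRING = "  "
--
-- _ANOTHER_EXCEPTIONS_STR = "During handling of the above exception, another exception occurred:"
--
-- _TRACEBACK_HEAD_TITLE = "Traceback (most recent call last):"
--
-- def _getTracebackPartsFromLines(tracebackLines: list):
--     """
--     Get traceback blocks (parts) from default traceback.format_exc() data lines.
--         @param tracebackLines: list of lines from traceback.format_exc()
--     """
--
--     tracebackParts = []
--     thisPartData = []
--
--     for line in tracebackLines: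
--         line = line.strip()
--         if line != '':
--             if line not in [_TRACEBACK_HEAD_TITLE, _ANOTHER_EXCEPTIONS_STR]:
--                 if line.find("File \"") != -1:
--                     # 'File "' string found, new traceback part
--                     if thisPartData:  # add last part
--                         tracebackParts.append(thisPartData)
--                     thisPartData = [line]
--                 else:
--                     thisPartData.append(INDENTATION_STRING + line)
--     tracebackParts.append(thisPartData)  # append the last block
--
--     return tracebackParts
-- ===== SOURCE B (Python) =====
-- INDENTATION_STRING = "  "
-- _ANOTHER_EXCEPTIONS_STR = "During handling of the above exception, another exception occurred:"
-- _TRACEBACK_HEAD_TITLE = "Traceback (most recent call last):"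
--
--
-- def _span(lines):
--     """Lines up to (not including) the first 'File "' line, and the rest."""
--     plain = []
--     for s in lines:
--         if 'File "' in s:
--             break
--         plain.append(s)
--     return plain, lines[len(plain):]
--
--
-- def _fileBlocks(lines):
--     """Blocks of a list that starts with a 'File "' line: each block is that
--     line verbatim followed by the indented plain lines after it."""
--     plain, rest = _span(lines[1:])
--     block = [lines[0]] + [INDENTATION_STRING + s for s in plain]
--     if rest:
--         return [block] + _fileBlocks(rest)
--     return [block]
--
--
-- def _getTracebackPartsFromLines(tracebackLines: list):
--     titles = (_TRACEBACK_HEAD_TITLE, _ANOTHER_EXCEPTIONS_STR)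
--     cleaned = [s for s in map(str.strip, tracebackLines) if s and s not in titles]
--     plain, rest = _span(cleaned)
--     parts = [[INDENTATION_STRING + s for s in plain]] if plain else []
--     if rest:
--         parts += _fileBlocks(rest)
--     return parts
-- ===== Notes on version B (the rewrite author's own statement) =====
-- stated objective: alternative
-- what changed: Replaces A's single stateful loop (open-block accumulator flushed at each File marker, with a final unconditional flush) by a pipeline: one cleaning pass (strip, drop blanks and the two titles), then a recursive splitter that cuts the cleaned list at 'File "' lines, emitting the leading plain segment (if any) and one block per File line.
-- intended difference: On inputs whose lines all strip to empty or to one of the two title constants, A returns a single empty block (an artefact of its unconditional final append) while B returns no blocks at all, the intended result. — e.g. on _getTracebackPartsFromLines([""]): A returns [[]], B returns []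
import Mathlib
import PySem

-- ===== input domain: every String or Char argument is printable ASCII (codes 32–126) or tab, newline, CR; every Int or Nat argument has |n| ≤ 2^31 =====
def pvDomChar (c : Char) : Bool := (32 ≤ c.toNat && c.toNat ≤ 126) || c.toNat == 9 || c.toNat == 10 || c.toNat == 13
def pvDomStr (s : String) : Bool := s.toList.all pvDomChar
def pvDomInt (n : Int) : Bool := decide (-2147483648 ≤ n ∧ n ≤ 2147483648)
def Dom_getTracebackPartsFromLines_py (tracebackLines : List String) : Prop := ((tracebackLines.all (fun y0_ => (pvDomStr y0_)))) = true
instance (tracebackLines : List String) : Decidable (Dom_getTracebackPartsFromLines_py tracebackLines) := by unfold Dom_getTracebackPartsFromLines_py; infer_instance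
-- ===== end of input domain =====

-- B rebuilds the result as a pipeline (cleaning pass, then a recursive splitter at
-- 'File "' lines) instead of A's single stateful flush-at-marker loop; objective:
-- alternative decomposition, not speed.

def pvIndent : String := "  "
def pvAnother : String := "During handling of the above exception, another exception occurred:"
def pvHead : String := "Traceback (most recent call last):"
-- INDENTATION_STRING + line (string concatenation, exact via PySem.Str.join)
def pvIndLine (t : String) : String := PySem.Str.join "" [pvIndent, t]

-- ===== PORT A =====
-- the body of A's for-loop, state = (tracebackParts, thisPartData)
def pvStepA (st : List (List String) × List String) (line0 : String) :
    List (List String) × List String :=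
  let line := PySem.Str.strip line0
  if line ≠ "" then
    if line ∉ [pvHead, pvAnother] then
      if PySem.Str.find line "File \"" ≠ -1 then
        (if st.2 ≠ [] then st.1 ++ [st.2] else st.1, [line])
      else
        (st.1, st.2 ++ [pvIndLine line])
    else st
  else st

def getTracebackPartsFromLines_py (tracebackLines : List String) : List (List String) :=
  let st := tracebackLines.foldl pvStepA ([], [])
  st.1 ++ [st.2]

-- ===== PORT B =====
def pvIsFileLine (s : String) : Bool := PySem.Str.isIn "File \"" s

-- _span's loop: append until a 'File "' line, the remainder of the traversal is
-- exactly lines[len(plain):] since plain is the prefix walked so far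
def pvSpanGo (acc : List String) : List String → List String × List String
  | [] => (acc, [])
  | s :: r => if pvIsFileLine s then (acc, s :: r) else pvSpanGo (acc ++ [s]) r

-- termination measure for pvFileBlocks (cited by its decreasing_by)
theorem pvSpanGo_snd_len (acc xs : List String) : (pvSpanGo acc xs).2.length ≤ xs.length := by
  induction xs generalizing acc with
  | nil => simp [pvSpanGo]
  | cons s r ih =>
    simp only [pvSpanGo]
    by_cases h : pvIsFileLine s = true
    · simp [h]
    · simp only [h]
      exact le_trans (ih _) (by simp)

def pvFileBlocks : List String → List (List String)
  | [] => []  -- _fileBlocks is never called on []; Python would raise there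
  | s :: r =>
    if (pvSpanGo [] r).2 ≠ [] then
      (s :: (pvSpanGo [] r).1.map pvIndLine) :: pvFileBlocks (pvSpanGo [] r).2
    else
      [s :: (pvSpanGo [] r).1.map pvIndLine]
termination_by xs => xs.length
decreasing_by
  have := pvSpanGo_snd_len [] r
  simp only [List.length_cons]
  omega

def pvCleanPred (s : String) : Bool := decide (s ≠ "" ∧ s ∉ [pvHead, pvAnother])

def getTracebackPartsFromLines_py_alt (tracebackLines : List String) : List (List String) :=
  let cleaned := (tracebackLines.map PySem.Str.strip).filter pvCleanPred
  let pr := pvSpanGo [] cleaned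
  let parts := if pr.1 ≠ [] then [pr.1.map pvIndLine] else []
  if pr.2 ≠ [] then parts ++ pvFileBlocks pr.2 else parts

-- ===== PRECONDITION & SPEC =====
-- On inputs whose lines all strip to empty or to one of the two title constants,
-- A returns a single empty block (an artefact of its unconditional final append)
-- while B returns no blocks at all, the intended result.
def D_getTracebackPartsFromLines_py (tracebackLines : List String) : Prop :=
  ∀ l ∈ tracebackLines, PySem.Str.strip l = "" ∨ PySem.Str.strip l = pvHead ∨ PySem.Str.strip l = pvAnother
instance (tracebackLines : List String) : Decidable (D_getTracebackPartsFromLines_py tracebackLines) := by unfold D_getTracebackPartsFromLines_py; infer_instance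

def Spec_getTracebackPartsFromLines_py (tracebackLines : List String) (out : List (List String)) : Prop := ¬ D_getTracebackPartsFromLines_py tracebackLines → out = getTracebackPartsFromLines_py_alt tracebackLines
instance (tracebackLines : List String) (out : List (List String)) : Decidable (Spec_getTracebackPartsFromLines_py tracebackLines out) := by unfold Spec_getTracebackPartsFromLines_py; infer_instance

def pvDiffWitness_getTracebackPartsFromLines_py : List String := [""]
def pvDiffWitnessOut_getTracebackPartsFromLines_py : (List (List String)) × (List (List String)) := ([[]], [])

-- ===== CLAIM =====
def Claim_unchanged_getTracebackPartsFromLines_py : Prop := ∀ (tracebackLines : List String), Dom_getTracebackPartsFromLines_py tracebackLines → Spec_getTracebackPartsFromLines_py tracebackLines (getTracebackPartsFromLines_py tracebackLines)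
def Claim_changed_getTracebackPartsFromLines_py : Prop := Dom_getTracebackPartsFromLines_py (pvDiffWitness_getTracebackPartsFromLines_py) ∧ D_getTracebackPartsFromLines_py (pvDiffWitness_getTracebackPartsFromLines_py) ∧ getTracebackPartsFromLines_py (pvDiffWitness_getTracebackPartsFromLines_py) = pvDiffWitnessOut_getTracebackPartsFromLines_py.1 ∧ getTracebackPartsFromLines_py_alt (pvDiffWitness_getTracebackPartsFromLines_py) = pvDiffWitnessOut_getTracebackPartsFromLines_py.2 ∧ pvDiffWitnessOut_getTracebackPartsFromLines_py.1 ≠ pvDiffWitnessOut_getTracebackPartsFromLines_py.2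
def Claim_exact_getTracebackPartsFromLines_py : Prop := ∀ (tracebackLines : List String), Dom_getTracebackPartsFromLines_py tracebackLines → D_getTracebackPartsFromLines_py tracebackLines → getTracebackPartsFromLines_py tracebackLines ≠ getTracebackPartsFromLines_py_alt tracebackLines

-- ===== LEMMAS AND PROOFS =====

-- A's loop body applied to an already-stripped line that passed the filter
def pvStepA' (st : List (List String) × List String) (line : String) :
    List (List String) × List String :=
  if PySem.Str.find line "File \"" ≠ -1 then
    (if st.2 ≠ [] then st.1 ++ [st.2] else st.1, [line])
  else
    (st.1, st.2 ++ [pvIndLine line])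

theorem pvMarker_iff (s : String) :
    (PySem.Str.find s "File \"" ≠ -1) ↔ pvIsFileLine s = true := by
  unfold pvIsFileLine
  rw [PySem.Str.find_ne_neg_one_iff, PySem.Str.isIn_iff_infix]

-- Lemma 1: A's fold over the raw lines = fold of pvStepA' over the cleaned list
theorem pvFoldClean (xs : List String) (st : List (List String) × List String) :
    xs.foldl pvStepA st
      = ((xs.map PySem.Str.strip).filter pvCleanPred).foldl pvStepA' st := by
  induction xs generalizing st with
  | nil => rfl
  | cons x xs ih =>
    simp only [List.foldl_cons, List.map_cons, List.filter_cons]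
    by_cases hp : pvCleanPred (PySem.Str.strip x) = true
    · have hp' : PySem.Str.strip x ≠ "" ∧ PySem.Str.strip x ∉ [pvHead, pvAnother] := by
        unfold pvCleanPred at hp; exact decide_eq_true_iff.mp hp
      have hstep : pvStepA st x = pvStepA' st (PySem.Str.strip x) := by
        simp only [pvStepA, pvStepA']
        rw [if_pos hp'.1, if_pos hp'.2]
      rw [if_pos hp, List.foldl_cons, hstep, ih]
    · have hp' : ¬(PySem.Str.strip x ≠ "" ∧ PySem.Str.strip x ∉ [pvHead, pvAnother]) := by
        unfold pvCleanPred at hp; simpa using hp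
      have hstep : pvStepA st x = st := by
        simp only [pvStepA]
        rw [Classical.not_and_iff_not_or_not] at hp'
        rcases hp' with h0 | h1
        · rw [if_neg h0]
        · by_cases h0' : PySem.Str.strip x = ""
          · rw [if_neg (by simp [h0'])]
          · rw [if_pos h0', if_neg h1]
      rw [if_neg hp, hstep, ih]

-- the 'rest of the traceback' semantics of A's loop, recursively
def pvH (cur : List String) : List String → List (List String)
  | [] => [cur]
  | s :: xs =>
    if pvIsFileLine s then
      (if cur ≠ [] then cur :: pvH [s] xs else pvH [s] xs)
    else pvH (cur ++ [pvIndLine s]) xs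

-- Lemma 2: the fold of pvStepA' computes pvH
theorem pvFoldH (xs : List String) : ∀ (parts : List (List String)) (cur : List String),
    (xs.foldl pvStepA' (parts, cur)).1 ++ [(xs.foldl pvStepA' (parts, cur)).2]
      = parts ++ pvH cur xs := by
  induction xs with
  | nil => intro parts cur; simp [pvH]
  | cons s xs ih =>
    intro parts cur
    simp only [List.foldl_cons, pvH]
    by_cases hm : pvIsFileLine s = true
    · have hf : PySem.Str.find s "File \"" ≠ -1 := (pvMarker_iff s).mpr hm
      have hst : pvStepA' (parts, cur) s
          = (if cur ≠ [] then parts ++ [cur] else parts, [s]) := by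
        unfold pvStepA'; rw [if_pos hf]
      rw [hst, ih, hm, if_pos rfl]
      by_cases hc : cur = [] <;> simp [hc]
    · have hf : ¬ (PySem.Str.find s "File \"" ≠ -1) := by rw [pvMarker_iff]; exact hm
      have hst : pvStepA' (parts, cur) s = (parts, cur ++ [pvIndLine s]) := by
        unfold pvStepA'; rw [if_neg hf]
      simp only [Bool.not_eq_true] at hm
      rw [hst, ih, hm]
      simp

-- pvH swallows a marker-free prefix into the open block
theorem pvHpre (t : List String) : ∀ (d : List String) (cur : List String),
    (∀ x ∈ t, pvIsFileLine x = false) →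
    pvH cur (t ++ d) = pvH (cur ++ t.map pvIndLine) d := by
  induction t with
  | nil => intro d cur _; simp
  | cons x t ih =>
    intro d cur hx
    have h0 : pvIsFileLine x = false := hx x (by simp)
    simp only [List.cons_append, pvH, h0, Bool.false_eq_true, if_false, List.map_cons]
    rw [ih d _ (fun y hy => hx y (by simp [hy]))]
    simp

-- pvSpanGo computes (takeWhile non-marker, dropWhile non-marker)
theorem pvSpanGo_eq (xs : List String) : ∀ (acc : List String),
    pvSpanGo acc xs
      = (acc ++ xs.takeWhile (fun s => !pvIsFileLine s),
         xs.dropWhile (fun s => !pvIsFileLine s)) := by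
  induction xs with
  | nil => intro acc; simp [pvSpanGo]
  | cons s r ih =>
    intro acc
    simp only [pvSpanGo, List.takeWhile_cons, List.dropWhile_cons]
    by_cases h : pvIsFileLine s = true
    · simp [h]
    · simp only [Bool.not_eq_true] at h
      simp [h, ih]

-- the head of a nonempty dropWhile fails the predicate
theorem pvDropHead {p : String → Bool} : ∀ {l : List String} {m : String} {r2 : List String},
    l.dropWhile p = m :: r2 → p m = false := by
  intro l
  induction l with
  | nil => intro m r2 h; simp at h
  | cons x xs ih =>
    intro m r2 h
    rw [List.dropWhile_cons] at h
    by_cases hx : p x = true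
    · rw [if_pos hx] at h; exact ih h
    · rw [if_neg hx] at h
      obtain ⟨rfl, -⟩ := List.cons.injEq .. ▸ h
      injection h with h1 _
      rw [← h1]
      simpa using hx

-- pvFileBlocks on a list headed by a marker computes pvH of its tail
theorem pvFB : ∀ (n : ℕ) (r : List String) (s : String), r.length ≤ n →
    pvFileBlocks (s :: r) = pvH [s] r := by
  intro n
  induction n with
  | zero =>
    intro r s hr
    have : r = [] := List.eq_nil_of_length_eq_zero (Nat.le_zero.mp hr)
    subst this
    simp [pvFileBlocks, pvSpanGo, pvH]
  | succ n ih =>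
    intro r s _hr
    rw [pvFileBlocks]
    rw [pvSpanGo_eq r []]
    have hsplit : r = r.takeWhile (fun s => !pvIsFileLine s)
        ++ r.dropWhile (fun s => !pvIsFileLine s) := (List.takeWhile_append_dropWhile).symm
    have htw : ∀ x ∈ r.takeWhile (fun s => !pvIsFileLine s), pvIsFileLine x = false := by
      intro x hx
      have := List.mem_takeWhile_imp hx
      simpa using this
    conv_rhs => rw [hsplit]
    rw [pvHpre _ _ [s] htw]
    simp only [List.nil_append, List.singleton_append]
    match hd : r.dropWhile (fun s => !pvIsFileLine s) with
    | [] => simp [pvH]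
    | m :: r2 =>
      have hm : pvIsFileLine m = true := by
        have := pvDropHead hd
        simpa using this
      have hlen : r2.length ≤ n := by
        have h1 : (r.dropWhile (fun s => !pvIsFileLine s)).length ≤ r.length :=
          (List.dropWhile_sublist _).length_le
        rw [hd] at h1
        simp only [List.length_cons] at h1
        omega
      simp only [pvH, hm]
      rw [if_pos (by simp), ih r2 m hlen]
      simp

-- ¬D_ ↔ the cleaned list is nonempty
theorem pvCleanNil_iff (xs : List String) :
    ((xs.map PySem.Str.strip).filter pvCleanPred = [])
      ↔ D_getTracebackPartsFromLines_py xs := by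
  rw [List.filter_eq_nil_iff]
  unfold D_getTracebackPartsFromLines_py
  constructor
  · intro h l hl
    have := h (PySem.Str.strip l) (List.mem_map_of_mem hl)
    unfold pvCleanPred at this
    simp only [decide_eq_true_iff] at this
    push Not at this
    by_cases h0 : PySem.Str.strip l = ""
    · exact Or.inl h0
    · have := this h0
      simp only [List.mem_cons] at this
      rcases (not_not.mp (by simpa using this)) with h | h
      · exact Or.inr (Or.inl h)
      · exact Or.inr (Or.inr h)
  · intro h a ha
    obtain ⟨l, hl, rfl⟩ := List.mem_map.mp ha
    unfold pvCleanPred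
    simp only [decide_eq_true_iff]
    rcases h l hl with h0 | h0 | h0 <;> simp [h0]

-- A's full result equals pvH [] of the cleaned list
theorem pvA_eq_H (xs : List String) :
    getTracebackPartsFromLines_py xs
      = pvH [] ((xs.map PySem.Str.strip).filter pvCleanPred) := by
  unfold getTracebackPartsFromLines_py
  rw [pvFoldClean xs ([], [])]
  have := pvFoldH ((xs.map PySem.Str.strip).filter pvCleanPred) [] []
  simpa using this

-- ===== VERDICT =====
theorem getTracebackPartsFromLines_py_spec : Claim_unchanged_getTracebackPartsFromLines_py := by
  intro xs _ hnd
  rw [pvA_eq_H]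
  simp only [getTracebackPartsFromLines_py_alt]
  set cleaned := (xs.map PySem.Str.strip).filter pvCleanPred with hcl
  have hne : cleaned ≠ [] := fun h => hnd ((pvCleanNil_iff xs).mp (hcl ▸ h))
  rw [pvSpanGo_eq cleaned []]
  have hsplit : cleaned = cleaned.takeWhile (fun s => !pvIsFileLine s)
      ++ cleaned.dropWhile (fun s => !pvIsFileLine s) := (List.takeWhile_append_dropWhile).symm
  have htw : ∀ x ∈ cleaned.takeWhile (fun s => !pvIsFileLine s), pvIsFileLine x = false := by
    intro x hx; simpa using List.mem_takeWhile_imp hx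
  conv_lhs => rw [hsplit]
  rw [pvHpre _ _ [] htw]
  simp only [List.nil_append]
  match hd : cleaned.dropWhile (fun s => !pvIsFileLine s) with
  | [] =>
    have ht : cleaned.takeWhile (fun s => !pvIsFileLine s) ≠ [] := by
      intro h
      exact hne (by rw [hsplit, h, hd]; rfl)
    simp [pvH, ht]
  | m :: r2 =>
    have hm : pvIsFileLine m = true := by
      have := pvDropHead hd
      simpa using this
    rw [pvFB r2.length r2 m le_rfl]
    by_cases ht : cleaned.takeWhile (fun s => !pvIsFileLine s) = []
    · simp [pvH, hm, ht]
    · simp [pvH, hm, ht, List.map_eq_nil_iff]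

theorem getTracebackPartsFromLines_py_changed : Claim_changed_getTracebackPartsFromLines_py := by
  unfold Claim_changed_getTracebackPartsFromLines_py
  decide

theorem getTracebackPartsFromLines_py_tight : Claim_exact_getTracebackPartsFromLines_py := by
  intro xs _ hd
  have hcl : (xs.map PySem.Str.strip).filter pvCleanPred = [] := (pvCleanNil_iff xs).mpr hd
  rw [pvA_eq_H, hcl]
  simp only [getTracebackPartsFromLines_py_alt, hcl]
  simp [pvSpanGo, pvH]
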